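-- pv_equiv track=rewrite | github.com/srinivaspavan9/cis6930sp24-assignment3 | assignment2.py | calculate_location_ranks
-- ===== SOURCE A (Python) =====
-- from collections import Counter
--
-- def calculate_location_ranks(incidents):
--     # Extract all locations
--     locations = [incident[2] for incident in incidents]  # Assuming location is at index 2
--     # Count frequencies
--     location_freq = Counter(locations)
--     # Sort locations by frequency, then alphabetically, and assign ranks
--     sorted_locations = sorted(location_freq.items(), key=lambda x: (-x[1], x[0]))
--
--     ranks = {}
--     last_freq = None
--     last_rank = 0
--     skip = 1
--     for location, freq in sorted_locations:
--         if freq == last_freq: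
--             ranks[location] = last_rank
--             skip += 1
--         else:
--             last_rank += skip
--             ranks[location] = last_rank
--             skip = 1
--         last_freq = freq
--
--     return ranks
-- ===== SOURCE B (Python) =====
-- from collections import Counter
--
-- def calculate_location_ranks(incidents):
--     freq = Counter([incident[2] for incident in incidents])
--     fs = list(freq.values())
--     return {loc: 1 + sum(1 for g in fs if g > f)
--             for loc, f in sorted(freq.items(), key=lambda x: (-x[1], x[0]))}
-- ===== Notes on version B (the rewrite author's own statement) =====
-- stated objective: simpler
-- what changed: Replaces A's sequential skip/last_rank/last_freq state machine over the sorted list by a direct per-location formula: rank = 1 + number of frequencies strictly greater, counted over the Counter's values.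
import Mathlib
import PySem

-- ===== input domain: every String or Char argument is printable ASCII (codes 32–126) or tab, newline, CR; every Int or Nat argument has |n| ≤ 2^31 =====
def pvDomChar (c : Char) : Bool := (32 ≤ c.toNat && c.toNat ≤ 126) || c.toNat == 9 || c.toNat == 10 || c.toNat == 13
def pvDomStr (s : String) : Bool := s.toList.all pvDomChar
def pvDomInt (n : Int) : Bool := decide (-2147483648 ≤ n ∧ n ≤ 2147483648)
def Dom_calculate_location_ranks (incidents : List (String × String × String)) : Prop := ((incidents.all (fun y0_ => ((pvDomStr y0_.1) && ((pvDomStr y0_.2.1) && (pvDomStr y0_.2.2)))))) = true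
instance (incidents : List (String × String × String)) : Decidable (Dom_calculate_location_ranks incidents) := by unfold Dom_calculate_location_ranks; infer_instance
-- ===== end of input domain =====

-- B replaces A's skip/last_rank/last_freq state machine over the sorted list by the
-- direct per-location formula rank = 1 + #(strictly greater frequencies); objective: simpler.

-- ===== PORT A =====
-- A's loop body: state (ranks, last_freq, last_rank, skip)
def pvStepA (st : PySem.Dict String Int × Option Int × Int × Int) (lf : String × Int) :
    PySem.Dict String Int × Option Int × Int × Int :=
  if some lf.2 == st.2.1 then
    (st.1.insert lf.1 st.2.2.1, some lf.2, st.2.2.1, st.2.2.2 + 1)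
  else
    (st.1.insert lf.1 (st.2.2.1 + st.2.2.2), some lf.2, st.2.2.1 + st.2.2.2, 1)

def calculate_location_ranks (incidents : List (String × String × String)) : List (String × Int) :=
  let locations := incidents.map (fun incident => incident.2.2)
  let location_freq := PySem.Dict.counter locations
  let sorted_locations := PySem.List.sorted2 location_freq.items (fun x => -x.2) (fun x => x.1)
  (sorted_locations.foldl pvStepA (PySem.Dict.empty, none, 0, 1)).1.items

-- ===== PORT B =====
def calculate_location_ranks_alt (incidents : List (String × String × String)) : List (String × Int) :=
  let freq := PySem.Dict.counter (incidents.map (fun incident => incident.2.2))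
  let fs := freq.values
  ((PySem.List.sorted2 freq.items (fun x => -x.2) (fun x => x.1)).foldl
      (fun d p => d.insert p.1 (1 + (fs.countP (fun g => decide (p.2 < g)) : Int)))
      PySem.Dict.empty).items

-- ===== PRECONDITION & SPEC =====
def Spec_calculate_location_ranks (incidents : List (String × String × String)) (out : List (String × Int)) : Prop := out = calculate_location_ranks_alt incidents
instance (incidents : List (String × String × String)) (out : List (String × Int)) : Decidable (Spec_calculate_location_ranks incidents out) := by unfold Spec_calculate_location_ranks; infer_instance

-- ===== CLAIM (what is proved, stated in full; the proofs are below) =====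
def Claim_equal_calculate_location_ranks : Prop := ∀ (incidents : List (String × String × String)), Dom_calculate_location_ranks incidents → Spec_calculate_location_ranks incidents (calculate_location_ranks incidents)

-- ===== LEMMAS AND PROOFS =====

-- Inserting into a list that is non-increasing in the second component keeps it so.
theorem pv_insertBy_pairwise (x : String × Int) (ys : List (String × Int))
    (h : ys.Pairwise (fun a b => b.2 ≤ a.2)) :
    (PySem.List.insertBy
        (fun a b => decide ((-a.2 : Int) < -b.2) || (!decide ((-b.2 : Int) < -a.2) && decide (a.1 < b.1)))
        x ys).Pairwise (fun a b => b.2 ≤ a.2) := by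
  induction ys with
  | nil => simp [PySem.List.insertBy]
  | cons y t ih =>
    rw [List.pairwise_cons] at h
    obtain ⟨hy, ht⟩ := h
    simp only [PySem.List.insertBy]
    split
    · rename_i hb
      simp only [Bool.or_eq_true, Bool.and_eq_true, decide_eq_true_eq, Bool.not_eq_true',
        decide_eq_false_iff_not] at hb
      have hxy : y.2 ≤ x.2 := by rcases hb with h1 | ⟨h1, _⟩ <;> omega
      refine List.Pairwise.cons ?_ (List.Pairwise.cons hy ht)
      intro z hz
      rcases List.mem_cons.mp hz with rfl | hz
      · exact hxy
      · exact le_trans (hy z hz) hxy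
    · rename_i hb
      simp only [Bool.or_eq_true, Bool.and_eq_true, decide_eq_true_eq, Bool.not_eq_true',
        decide_eq_false_iff_not, not_or, not_and] at hb
      have hyx : x.2 ≤ y.2 := by omega
      refine List.Pairwise.cons ?_ (ih ht)
      intro z hz
      rw [PySem.List.insertBy_mem_iff] at hz
      rcases hz with rfl | hz
      · exact hyx
      · exact hy z hz

-- The sorted list is pairwise non-increasing in frequency (second component).
theorem pv_sorted2_pairwise (xs : List (String × Int)) :
    (PySem.List.sorted2 xs (fun x => -x.2) (fun x => x.1)).Pairwise (fun a b => b.2 ≤ a.2) := by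
  simp only [PySem.List.sorted2]
  induction xs using List.reverseRecOn with
  | nil => simp
  | append_singleton t x ih =>
    rw [List.foldl_append, List.foldl_cons, List.foldl_nil]
    exact pv_insertBy_pairwise x _ ih

-- On a list of values all ≥ f, "greater than f" and "equal to f" partition the list.
theorem pv_cnt_split (xs : List Int) (f : Int) (h : ∀ x ∈ xs, f ≤ x) :
    xs.countP (fun x => decide (f < x)) + xs.countP (fun x => decide (x = f)) = xs.length := by
  induction xs with
  | nil => simp
  | cons y t ih =>
    have hy := h y (by simp)
    have ht := ih (fun x hx => h x (by simp [hx]))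
    by_cases hgt : f < y
    · simp [hgt, show ¬(y = f) by omega]; omega
    · simp [show y = f by omega]; omega

-- Invariant of A's loop: entering an iteration after processing prefix P whose last
-- frequency is f, last_rank is 1 + #(frequencies > f) and skip is #(frequencies = f in P);
-- hence every element gets the direct rank 1 + #(strictly greater frequencies).
theorem pv_fold (L : List (String × Int)) (hL : L.Pairwise (fun a b => b.2 ≤ a.2)) :
    ∀ (l P : List (String × Int)) (f r s : Int) (d : PySem.Dict String Int),
      L = P ++ l →
      (∀ p ∈ P, f ≤ p.2) →
      (∀ p ∈ l, p.2 ≤ f) →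
      r = 1 + ((L.map (·.2)).countP (fun x => decide (f < x)) : Int) →
      s = ((P.map (·.2)).countP (fun x => decide (x = f)) : Int) →
      (l.foldl pvStepA (d, some f, r, s)).1
        = l.foldl (fun d p => d.insert p.1 (1 + ((L.map (·.2)).countP (fun x => decide (p.2 < x)) : Int))) d := by
  intro l
  induction l with
  | nil => intro P f r s d _ _ _ _ _; rfl
  | cons hd t ih =>
    intro P f r s d hLP hPf hlf hr hs
    have hhd : hd.2 ≤ f := hlf hd (by simp)
    have htle : ∀ p ∈ t, p.2 ≤ hd.2 := by
      have h2 := hL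
      rw [hLP, List.pairwise_append] at h2
      exact fun p hp => (List.pairwise_cons.mp h2.2.1).1 p hp
    rw [List.foldl_cons, List.foldl_cons]
    by_cases heq : hd.2 = f
    · subst heq
      have hstep : pvStepA (d, some hd.2, r, s) hd
          = (d.insert hd.1 r, some hd.2, r, s + 1) := by
        simp [pvStepA]
      rw [hstep, ← hr]
      refine ih (P ++ [hd]) hd.2 r (s + 1) _ (by simp [hLP]) ?_ htle hr ?_
      · intro p hp
        rcases List.mem_append.mp hp with hp | hp
        · exact hPf p hp
        · simp at hp; subst hp; exact le_refl _
      · rw [List.map_append, List.countP_append]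
        simp only [List.map_cons, List.map_nil, List.countP_cons, List.countP_nil,
          decide_eq_true_eq]
        simp only [hs]
        push_cast
        simp
    · have hlt : hd.2 < f := lt_of_le_of_ne hhd heq
      have hstep : pvStepA (d, some f, r, s) hd
          = (d.insert hd.1 (r + s), some hd.2, r + s, 1) := by
        simp [pvStepA]
        intro h; exact absurd h heq
      have hPge : ∀ x ∈ P.map (·.2), f ≤ x := by
        intro x hx
        obtain ⟨p, hp, rfl⟩ := List.mem_map.mp hx
        exact hPf p hp
      have hsplit := pv_cnt_split (P.map (·.2)) f hPge
      have hVdec : L.map (·.2) = P.map (·.2) ++ hd.2 :: t.map (·.2) := by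
        simp [hLP]
      have hsuf_f : (hd.2 :: t.map (·.2)).countP (fun x => decide (f < x)) = 0 := by
        rw [List.countP_eq_zero]
        intro x hx
        rcases List.mem_cons.mp hx with rfl | hx
        · simp; omega
        · obtain ⟨p, hp, rfl⟩ := List.mem_map.mp hx
          have := htle p hp; simp; omega
      have hsuf_g : (hd.2 :: t.map (·.2)).countP (fun x => decide (hd.2 < x)) = 0 := by
        rw [List.countP_eq_zero]
        intro x hx
        rcases List.mem_cons.mp hx with rfl | hx
        · simp
        · obtain ⟨p, hp, rfl⟩ := List.mem_map.mp hx
          have := htle p hp; simp; omega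
      have hP_g : (P.map (·.2)).countP (fun x => decide (hd.2 < x)) = (P.map (·.2)).length := by
        rw [List.countP_eq_length]
        intro x hx
        have := hPge x hx; simp; omega
      have hkey : r + s = 1 + ((L.map (·.2)).countP (fun x => decide (hd.2 < x)) : Int) := by
        rw [hVdec, List.countP_append, hP_g, hsuf_g]
        rw [hVdec, List.countP_append, hsuf_f] at hr
        rw [hr, hs]
        push_cast
        omega
      rw [hstep, ← hkey]
      refine ih (P ++ [hd]) hd.2 (r + s) 1 _ (by simp [hLP]) ?_ htle hkey ?_
      · intro p hp
        rcases List.mem_append.mp hp with hp | hp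
        · exact le_trans (le_of_lt hlt) (hPf p hp)
        · simp at hp; subst hp; exact le_refl _
      · rw [List.map_append, List.countP_append]
        have hP0 : (P.map (·.2)).countP (fun x => decide (x = hd.2)) = 0 := by
          rw [List.countP_eq_zero]
          intro x hx
          have := hPge x hx; simp; omega
        simp [hP0]

-- ===== VERDICT (by name: the statement is the Claim_ definition above) =====
theorem calculate_location_ranks_spec : Claim_equal_calculate_location_ranks := by
  unfold Claim_equal_calculate_location_ranks Spec_calculate_location_ranks
  intro incidents _
  unfold calculate_location_ranks calculate_location_ranks_alt
  simp only []
  set items := (PySem.Dict.counter (incidents.map (fun incident => incident.2.2))).items with hitems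
  set L := PySem.List.sorted2 items (fun x => -x.2) (fun x => x.1) with hLdef
  have hpw : L.Pairwise (fun a b => b.2 ≤ a.2) := pv_sorted2_pairwise items
  have hperm : (L.map (·.2)).Perm
      ((PySem.Dict.counter (incidents.map (fun incident => incident.2.2))).values) := by
    exact (PySem.List.sorted2_perm items (fun x => -x.2) (fun x => x.1) false).map (·.2)
  have hfun : ∀ (p : String × Int),
      (1 + (((PySem.Dict.counter (incidents.map (fun incident => incident.2.2))).values.countP
          (fun g => decide (p.2 < g))) : Int))
        = 1 + ((L.map (·.2)).countP (fun x => decide (p.2 < x)) : Int) := by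
    intro p
    rw [hperm.countP_eq]
  cases hc : L with
  | nil => rfl
  | cons hd tl =>
    have hle : ∀ p ∈ L, p.2 ≤ hd.2 := by
      intro p hp
      rw [hc] at hp hpw
      rcases List.mem_cons.mp hp with rfl | hp
      · exact le_refl _
      · exact (List.pairwise_cons.mp hpw).1 p hp
    have hcnt0 : (L.map (·.2)).countP (fun x => decide (hd.2 < x)) = 0 := by
      rw [List.countP_eq_zero]
      intro x hx
      obtain ⟨p, hp, rfl⟩ := List.mem_map.mp hx
      have := hle p hp; simp; omega
    have hA1 : pvStepA (PySem.Dict.empty, none, (0 : Int), (1 : Int)) hd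
        = (PySem.Dict.empty.insert hd.1 1, some hd.2, 1, 1) := by
      simp [pvStepA]
    have hmain := pv_fold L hpw tl [hd] hd.2 1 1 (PySem.Dict.empty.insert hd.1 1)
      (by rw [hc]; rfl)
      (by intro p hp; simp at hp; subst hp; exact le_refl _)
      (by intro p hp; apply hle; rw [hc]; exact List.mem_cons_of_mem hd hp)
      (by rw [hcnt0]; simp)
      (by simp)
    rw [List.foldl_cons, List.foldl_cons, hA1, hmain]
    congr 1
    have h1 : (1 + (((PySem.Dict.counter (incidents.map (fun incident => incident.2.2))).values.countP
        (fun g => decide (hd.2 < g))) : Int)) = 1 := by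
      rw [hfun hd, hcnt0]; simp
    rw [h1]
    symm
    apply PySem.List.foldl_congr_mem
    intro acc p _
    rw [hfun p]
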